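-- pv_equiv track=rewrite | github.com/riyaatlas/PublicCare | backend/utils.py | map_category_to_department
-- ===== SOURCE A (Python) =====
-- def map_category_to_department(category):
--     cat = (category or '').lower()
--     if any(k in cat for k in ['water', 'tap', 'pipeline', 'leak']):
--         return 'water'
--     if any(k in cat for k in ['electric', 'light', 'power', 'streetlight', 'electrical']):
--         return 'electricity'
--     if any(k in cat for k in ['road', 'pothole', 'pavement', 'traffic']):
--         return 'roads'
--     if any(k in cat for k in ['garbage', 'waste', 'dump', 'trash']):
--         return 'waste'
--     if any(k in cat for k in ['hospital', 'doctor', 'clinic', 'health', 'medical']):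
--         return 'healthcare'
--     return 'unknown'
-- ===== SOURCE B (Python) =====
-- # Single left-to-right scan of the text: at each position try every keyword as a
-- # prefix (naive multi-pattern matching) and keep the minimum priority seen.
-- KEYWORDS = [
--     ('water', 0), ('tap', 0), ('pipeline', 0), ('leak', 0),
--     ('electric', 1), ('light', 1), ('power', 1), ('streetlight', 1), ('electrical', 1),
--     ('road', 2), ('pothole', 2), ('pavement', 2), ('traffic', 2),
--     ('garbage', 3), ('waste', 3), ('dump', 3), ('trash', 3),
--     ('hospital', 4), ('doctor', 4), ('clinic', 4), ('health', 4), ('medical', 4),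
-- ]
-- DEPTS = ['water', 'electricity', 'roads', 'waste', 'healthcare']
--
-- def map_category_to_department(category):
--     cat = (category or '').lower()
--     best = None
--     for i in range(len(cat)):
--         for kw, pri in KEYWORDS:
--             if cat.startswith(kw, i) and (best is None or pri < best):
--                 best = pri
--     return DEPTS[best] if best is not None else 'unknown'
-- ===== Notes on version B (the rewrite author's own statement) =====
-- stated objective: alternative
-- what changed: Instead of searching the text once per keyword (any(k in cat) per branch), B makes a single left-to-right scan of the text, trying every keyword as a prefix at each position (naive multi-pattern matching) and keeping the minimum-priority group matched; the department is then looked up by that priority.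
import Mathlib
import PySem

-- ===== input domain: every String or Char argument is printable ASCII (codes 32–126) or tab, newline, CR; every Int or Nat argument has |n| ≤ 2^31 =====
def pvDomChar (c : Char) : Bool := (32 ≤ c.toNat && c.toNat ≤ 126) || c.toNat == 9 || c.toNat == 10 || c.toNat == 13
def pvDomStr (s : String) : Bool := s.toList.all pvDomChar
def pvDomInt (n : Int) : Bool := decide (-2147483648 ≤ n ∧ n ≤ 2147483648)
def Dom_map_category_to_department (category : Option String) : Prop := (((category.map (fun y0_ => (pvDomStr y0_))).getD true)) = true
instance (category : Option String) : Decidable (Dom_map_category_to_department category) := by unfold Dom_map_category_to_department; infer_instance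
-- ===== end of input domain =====

-- B replaces A's per-keyword substring searches by a single left-to-right scan of the text that tries
-- every keyword as a prefix at each position (naive multi-pattern matching) and keeps the minimum
-- priority found (alternative algorithm; same asymptotic cost).


-- ===== PORT A =====
def map_category_to_department (category : Option String) : String :=
  let cat := PySem.Str.lower (category.getD "")   -- (category or '').lower(); None and '' both give ''
  if ["water", "tap", "pipeline", "leak"].any (fun k => PySem.Str.isIn k cat) then "water"
  else if ["electric", "light", "power", "streetlight", "electrical"].any (fun k => PySem.Str.isIn k cat) then "electricity"
  else if ["road", "pothole", "pavement", "traffic"].any (fun k => PySem.Str.isIn k cat) then "roads"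
  else if ["garbage", "waste", "dump", "trash"].any (fun k => PySem.Str.isIn k cat) then "waste"
  else if ["hospital", "doctor", "clinic", "health", "medical"].any (fun k => PySem.Str.isIn k cat) then "healthcare"
  else "unknown"

-- ===== PORT B =====
def pvKeywords : List (String × Nat) :=
  [("water", 0), ("tap", 0), ("pipeline", 0), ("leak", 0),
   ("electric", 1), ("light", 1), ("power", 1), ("streetlight", 1), ("electrical", 1),
   ("road", 2), ("pothole", 2), ("pavement", 2), ("traffic", 2),
   ("garbage", 3), ("waste", 3), ("dump", 3), ("trash", 3),
   ("hospital", 4), ("doctor", 4), ("clinic", 4), ("health", 4), ("medical", 4)]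

def pvDepts : List String := ["water", "electricity", "roads", "waste", "healthcare"]

def map_category_to_department_alt (category : Option String) : String :=
  let cat := PySem.Str.lower (category.getD "")
  let best :=
    (PySem.List.pyRange 0 (PySem.Str.len cat) 1).foldl
      (fun (best : Option Nat) i =>
        pvKeywords.foldl
          (fun best kp =>
            -- cat.startswith(kw, i) with 0 ≤ i: the keyword's chars are a prefix of the text from position i (exact there)
            if kp.1.toList.isPrefixOf (cat.toList.drop i.toNat)
                && best.all (fun b => decide (kp.2 < b))
            then some kp.2 else best)
          best)
      none
  match best with
  | some p => PySem.List.pyGetD pvDepts (p : Int) "unknown"   -- DEPTS[best]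
  | none => "unknown"

-- ===== PRECONDITION & SPEC =====
def Spec_map_category_to_department (category : Option String) (out : String) : Prop := out = map_category_to_department_alt category
instance (category : Option String) (out : String) : Decidable (Spec_map_category_to_department category out) := by unfold Spec_map_category_to_department; infer_instance

-- ===== CLAIM (what is proved, stated in full; the proofs are below) =====
def Claim_equal_map_category_to_department : Prop := ∀ (category : Option String), Dom_map_category_to_department category → Spec_map_category_to_department category (map_category_to_department category)

-- ===== LEMMAS AND PROOFS =====

/-- The running-minimum step on the value list. -/
def pvMStep (b : Option Nat) (p : Nat) : Option Nat :=
  some (match b with | none => p | some q => min q p)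

/-- Priorities of all keyword occurrences found by B's scan, in scan order. -/
def pvMatched (cat : String) : List Nat :=
  (PySem.List.pyRange 0 (PySem.Str.len cat) 1).flatMap
    (fun i => (pvKeywords.filter
        (fun kp => kp.1.toList.isPrefixOf (cat.toList.drop i.toNat))).map (fun kp => kp.2))

theorem pv_condfold_eq {π : Type} (P : π → Bool) (v : π → Nat) (L : List π) (b : Option Nat) :
    L.foldl (fun b x => if P x && b.all (fun q => decide (v x < q)) then some (v x) else b) b
      = ((L.filter P).map v).foldl pvMStep b := by
  induction L generalizing b with
  | nil => rfl
  | cons x L ih =>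
    rw [List.foldl_cons, List.filter_cons]
    by_cases hP : P x = true
    · have hstep : (if P x && b.all (fun q => decide (v x < q)) then some (v x) else b)
          = pvMStep b (v x) := by
        cases b with
        | none => simp [hP, pvMStep]
        | some q =>
          by_cases hlt : v x < q
          · simp [hP, hlt, pvMStep, Nat.min_eq_right (Nat.le_of_lt hlt)]
          · simp [hP, hlt, pvMStep, Nat.min_eq_left (Nat.le_of_not_lt hlt)]
      rw [hstep, if_pos hP, List.map_cons, List.foldl_cons, ih]
    · have hskip : (if P x && b.all (fun q => decide (v x < q)) then some (v x) else b) = b := by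
        simp [hP]
      rw [hskip, if_neg hP, ih]

theorem pv_mfold_some (vs : List Nat) (q : Nat) :
    vs.foldl pvMStep (some q) = some (vs.foldl min q) := by
  induction vs generalizing q with
  | nil => rfl
  | cons v vs ih => simp [pvMStep, ih]

theorem pv_mfold_none (vs : List Nat) : vs.foldl pvMStep none = vs.min? := by
  cases vs with
  | nil => rfl
  | cons v vs => simp [pvMStep, pv_mfold_some, List.min?]

theorem pv_best_aux (cat : String) (is : List Int) (b : Option Nat) :
    is.foldl
      (fun (best : Option Nat) i =>
        pvKeywords.foldl
          (fun best kp =>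
            if kp.1.toList.isPrefixOf (cat.toList.drop i.toNat)
                && best.all (fun b => decide (kp.2 < b))
            then some kp.2 else best)
          best)
      b
    = (is.flatMap
        (fun i => (pvKeywords.filter
            (fun kp => kp.1.toList.isPrefixOf (cat.toList.drop i.toNat))).map (fun kp => kp.2))).foldl
        pvMStep b := by
  induction is generalizing b with
  | nil => rfl
  | cons i is ih =>
    rw [List.foldl_cons, List.flatMap_cons, List.foldl_append, ih]
    congr 1
    exact pv_condfold_eq
      (fun kp : String × Nat => kp.1.toList.isPrefixOf (cat.toList.drop i.toNat))
      (fun kp : String × Nat => kp.2) pvKeywords b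

/-- B's double fold computes the minimum matched priority. -/
theorem pv_best_eq (cat : String) :
    (PySem.List.pyRange 0 (PySem.Str.len cat) 1).foldl
      (fun (best : Option Nat) i =>
        pvKeywords.foldl
          (fun best kp =>
            if kp.1.toList.isPrefixOf (cat.toList.drop i.toNat)
                && best.all (fun b => decide (kp.2 < b))
            then some kp.2 else best)
          best)
      none = (pvMatched cat).min? := by
  rw [pv_best_aux, pv_mfold_none]; rfl

/-- Substring bridge: a nonempty keyword occurs in `cat` iff it is a prefix at some scanned position. -/
theorem pv_isIn_iff (kw cat : String) (hne : kw.toList ≠ []) :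
    PySem.Str.isIn kw cat = true ↔
      ∃ i : Int, (0 ≤ i ∧ i < (cat.toList.length : Int)) ∧
        kw.toList.isPrefixOf (cat.toList.drop i.toNat) = true := by
  rw [PySem.Str.isIn_iff_infix]
  constructor
  · rintro ⟨s, t, hst⟩
    refine ⟨(s.length : Int), ⟨by positivity, ?_⟩, ?_⟩
    · have : cat.toList.length = s.length + (kw.toList.length + t.length) := by
        rw [← hst]; simp
      have hk : 0 < kw.toList.length := List.length_pos_iff.mpr hne
      omega
    · rw [List.isPrefixOf_iff_prefix]
      have hdrop : cat.toList.drop (s.length : Int).toNat = kw.toList ++ t := by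
        rw [← hst, List.append_assoc, Int.toNat_natCast, List.drop_left]
      rw [hdrop]
      exact List.prefix_append kw.toList t
  · rintro ⟨i, ⟨h0, hlt⟩, hpre⟩
    exact List.infix_iff_prefix_suffix.mpr
      ⟨cat.toList.drop i.toNat, List.isPrefixOf_iff_prefix.mp hpre, List.drop_suffix _ _⟩

/-- Membership in the matched-priority list. -/
theorem pv_mem_matched_iff (cat : String) (j : Nat) :
    j ∈ pvMatched cat ↔ ∃ kw, (kw, j) ∈ pvKeywords ∧ PySem.Str.isIn kw cat = true := by
  have hne : ∀ kp ∈ pvKeywords, kp.1.toList ≠ [] := by decide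
  constructor
  · intro h
    simp only [pvMatched, List.mem_flatMap, List.mem_map, List.mem_filter,
      PySem.List.mem_pyRange_one] at h
    obtain ⟨i, hi, kp, ⟨hkp, hpre⟩, rfl⟩ := h
    refine ⟨kp.1, by simpa using hkp, ?_⟩
    refine (pv_isIn_iff kp.1 cat (hne kp hkp)).mpr ⟨i, ⟨hi.1, ?_⟩, hpre⟩
    simpa using hi.2
  · rintro ⟨kw, hkw, hin⟩
    obtain ⟨i, ⟨h0, hlt⟩, hpre⟩ := (pv_isIn_iff kw cat (hne (kw, j) hkw)).mp hin
    simp only [pvMatched, List.mem_flatMap, List.mem_map, List.mem_filter,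
      PySem.List.mem_pyRange_one]
    exact ⟨i, ⟨h0, by simpa using hlt⟩, (kw, j), ⟨hkw, hpre⟩, rfl⟩

theorem pv_matched_le (cat : String) (j : Nat) (h : j ∈ pvMatched cat) : j ≤ 4 := by
  obtain ⟨kw, hkw, -⟩ := (pv_mem_matched_iff cat j).mp h
  have h4 : ∀ kp ∈ pvKeywords, kp.2 ≤ 4 := by decide
  exact h4 (kw, j) hkw

theorem pv_matched0 (cat : String) :
    0 ∈ pvMatched cat ↔ (["water", "tap", "pipeline", "leak"].any (fun k => PySem.Str.isIn k cat)) = true := by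
  rw [pv_mem_matched_iff]; simp [pvKeywords]

theorem pv_matched1 (cat : String) :
    1 ∈ pvMatched cat ↔ (["electric", "light", "power", "streetlight", "electrical"].any (fun k => PySem.Str.isIn k cat)) = true := by
  rw [pv_mem_matched_iff]; simp [pvKeywords]

theorem pv_matched2 (cat : String) :
    2 ∈ pvMatched cat ↔ (["road", "pothole", "pavement", "traffic"].any (fun k => PySem.Str.isIn k cat)) = true := by
  rw [pv_mem_matched_iff]; simp [pvKeywords]

theorem pv_matched3 (cat : String) :
    3 ∈ pvMatched cat ↔ (["garbage", "waste", "dump", "trash"].any (fun k => PySem.Str.isIn k cat)) = true := by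
  rw [pv_mem_matched_iff]; simp [pvKeywords]

theorem pv_matched4 (cat : String) :
    4 ∈ pvMatched cat ↔ (["hospital", "doctor", "clinic", "health", "medical"].any (fun k => PySem.Str.isIn k cat)) = true := by
  rw [pv_mem_matched_iff]; simp [pvKeywords]

theorem pv_core (cat : String) :
    (if ["water", "tap", "pipeline", "leak"].any (fun k => PySem.Str.isIn k cat) then "water"
     else if ["electric", "light", "power", "streetlight", "electrical"].any (fun k => PySem.Str.isIn k cat) then "electricity"
     else if ["road", "pothole", "pavement", "traffic"].any (fun k => PySem.Str.isIn k cat) then "roads"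
     else if ["garbage", "waste", "dump", "trash"].any (fun k => PySem.Str.isIn k cat) then "waste"
     else if ["hospital", "doctor", "clinic", "health", "medical"].any (fun k => PySem.Str.isIn k cat) then "healthcare"
     else "unknown")
    = (match (pvMatched cat).min? with
       | some p => PySem.List.pyGetD pvDepts (p : Int) "unknown"
       | none => "unknown") := by
  by_cases h0 : (["water", "tap", "pipeline", "leak"].any (fun k => PySem.Str.isIn k cat)) = true
  · have hm : (pvMatched cat).min? = some 0 :=
      List.min?_eq_some_iff.mpr ⟨(pv_matched0 cat).mpr h0, fun b _ => Nat.zero_le b⟩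
    rw [hm, if_pos h0]; rfl
  by_cases h1 : (["electric", "light", "power", "streetlight", "electrical"].any (fun k => PySem.Str.isIn k cat)) = true
  · have hm : (pvMatched cat).min? = some 1 := by
      refine List.min?_eq_some_iff.mpr ⟨(pv_matched1 cat).mpr h1, fun b hb => ?_⟩
      have b0 : b ≠ 0 := fun e => h0 ((pv_matched0 cat).mp (e ▸ hb))
      omega
    rw [hm, if_neg h0, if_pos h1]; rfl
  by_cases h2 : (["road", "pothole", "pavement", "traffic"].any (fun k => PySem.Str.isIn k cat)) = true
  · have hm : (pvMatched cat).min? = some 2 := by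
      refine List.min?_eq_some_iff.mpr ⟨(pv_matched2 cat).mpr h2, fun b hb => ?_⟩
      have b0 : b ≠ 0 := fun e => h0 ((pv_matched0 cat).mp (e ▸ hb))
      have b1 : b ≠ 1 := fun e => h1 ((pv_matched1 cat).mp (e ▸ hb))
      omega
    rw [hm, if_neg h0, if_neg h1, if_pos h2]; rfl
  by_cases h3 : (["garbage", "waste", "dump", "trash"].any (fun k => PySem.Str.isIn k cat)) = true
  · have hm : (pvMatched cat).min? = some 3 := by
      refine List.min?_eq_some_iff.mpr ⟨(pv_matched3 cat).mpr h3, fun b hb => ?_⟩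
      have b0 : b ≠ 0 := fun e => h0 ((pv_matched0 cat).mp (e ▸ hb))
      have b1 : b ≠ 1 := fun e => h1 ((pv_matched1 cat).mp (e ▸ hb))
      have b2 : b ≠ 2 := fun e => h2 ((pv_matched2 cat).mp (e ▸ hb))
      omega
    rw [hm, if_neg h0, if_neg h1, if_neg h2, if_pos h3]; rfl
  by_cases h4 : (["hospital", "doctor", "clinic", "health", "medical"].any (fun k => PySem.Str.isIn k cat)) = true
  · have hm : (pvMatched cat).min? = some 4 := by
      refine List.min?_eq_some_iff.mpr ⟨(pv_matched4 cat).mpr h4, fun b hb => ?_⟩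
      have b0 : b ≠ 0 := fun e => h0 ((pv_matched0 cat).mp (e ▸ hb))
      have b1 : b ≠ 1 := fun e => h1 ((pv_matched1 cat).mp (e ▸ hb))
      have b2 : b ≠ 2 := fun e => h2 ((pv_matched2 cat).mp (e ▸ hb))
      have b3 : b ≠ 3 := fun e => h3 ((pv_matched3 cat).mp (e ▸ hb))
      omega
    rw [hm, if_neg h0, if_neg h1, if_neg h2, if_neg h3, if_pos h4]; rfl
  · have hm : (pvMatched cat).min? = none := by
      rw [List.min?_eq_none_iff, List.eq_nil_iff_forall_not_mem]
      intro j hj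
      have hle := pv_matched_le cat j hj
      interval_cases j
      · exact h0 ((pv_matched0 cat).mp hj)
      · exact h1 ((pv_matched1 cat).mp hj)
      · exact h2 ((pv_matched2 cat).mp hj)
      · exact h3 ((pv_matched3 cat).mp hj)
      · exact h4 ((pv_matched4 cat).mp hj)
    rw [hm, if_neg h0, if_neg h1, if_neg h2, if_neg h3, if_neg h4]

theorem pv_combined (cat : String) :
    (if ["water", "tap", "pipeline", "leak"].any (fun k => PySem.Str.isIn k cat) then "water"
     else if ["electric", "light", "power", "streetlight", "electrical"].any (fun k => PySem.Str.isIn k cat) then "electricity"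
     else if ["road", "pothole", "pavement", "traffic"].any (fun k => PySem.Str.isIn k cat) then "roads"
     else if ["garbage", "waste", "dump", "trash"].any (fun k => PySem.Str.isIn k cat) then "waste"
     else if ["hospital", "doctor", "clinic", "health", "medical"].any (fun k => PySem.Str.isIn k cat) then "healthcare"
     else "unknown")
    = (match
        (PySem.List.pyRange 0 (PySem.Str.len cat) 1).foldl
          (fun (best : Option Nat) i =>
            pvKeywords.foldl
              (fun best kp =>
                if kp.1.toList.isPrefixOf (cat.toList.drop i.toNat)
                    && best.all (fun b => decide (kp.2 < b))
                then some kp.2 else best)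
              best)
          none with
       | some p => PySem.List.pyGetD pvDepts (p : Int) "unknown"
       | none => "unknown") := by
  rw [pv_best_eq]
  exact pv_core cat

-- ===== VERDICT (by name: the statement is the Claim_ definition above) =====
set_option maxHeartbeats 1000000 in
theorem map_category_to_department_spec : Claim_equal_map_category_to_department := by
  intro category _
  show map_category_to_department category = map_category_to_department_alt category
  simp only [map_category_to_department, map_category_to_department_alt]
  exact pv_combined (PySem.Str.lower (category.getD ""))
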